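-- pv_equiv track=rewrite | github.com/Juroldang/code | PC - 2024 - 1/Taller 5 - PC 2024-1/taller_imagenes.py | crear_collage
-- ===== SOURCE A (Python) =====
-- def reflejar_vertical(matriz):
--     '''
--     Retorna una copia de matriz invirtiendo el orden de sus filas.
--     '''
--     # En este espacio debe ir su implementación de reflejar_vertical
--     imgvolteada = []
--     for i in range(len(matriz)):
--         imgvolteada.append(matriz[len(matriz) - i - 1])
--     return imgvolteada
--
-- def reflejar_horizontal(matriz):
--     '''
--     Retorna una copia de matriz invirtiendo el orden de sus columnas.
--     '''
--     # En este espacio debe ir su implementación de reflejar_horizontal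
--     matrizh = []
--     for i in range(len(matriz)):
--         matrizh.append(matriz[i][::-1])
--     return matrizh
--
-- def crear_collage(matriz):
--     '''
--     Sean F y C la cantidad de filas y columnas de matriz, respectivamente.
--     Esta función retorna una matriz collage de tamaño 2F x 2C.
--     Las primeras F filas y C columnas de collage contienen una copia de matriz.
--     Las filas 0 a F-1 y las columnas C a 2C-1 de collage contienen una copia
--     de matriz reflejada horizontalmente. Las filas F a 2F-1 y las columnas
--     0 a C-1 de collage contienen una copia de matriz reflejada verticalmente.
--     Finalmente, las filas F a 2F-1 y las columnas C a 2C-1 de collage contienen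
--     una copia de matriz reflejada tanto horizontal como verticalmente.
--     '''
--     # En este espacio debe ir su implementación de crear_collage
--     collage = []
--     matriz_horizontal = reflejar_horizontal(matriz)
--     matriz_vertical = reflejar_vertical(matriz)
--     matriz_simetrica = reflejar_vertical(matriz_horizontal)
--     for i in range(len(matriz)):
--         collage.append(matriz[i] + matriz_horizontal[i])
--     for i in range(len(matriz)):
--         collage.append(matriz_vertical[i] + matriz_simetrica[i])
--     return collage
-- ===== SOURCE B (Python) =====
-- def crear_collage(matriz):
--     # Coordinate-mapping construction: instead of building reflected matrices
--     # and concatenating them, compute each collage cell directly from its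
--     # (i, j) position by folding the mirrored coordinates back into matriz.
--     F = len(matriz)
--     collage = []
--     for i in range(2 * F):
--         src = matriz[i] if i < F else matriz[2 * F - 1 - i]
--         C = len(src)
--         collage.append([src[j if j < C else 2 * C - 1 - j] for j in range(2 * C)])
--     return collage
-- ===== Notes on version B (the rewrite author's own statement) =====
-- stated objective: alternative
-- what changed: B computes each collage cell directly from its (i,j) coordinates via the mirror index formulas (i<F ? i : 2F-1-i, j<C ? j : 2C-1-j), instead of pre-building three reflected matrices and concatenating them row-by-row.
import Mathlib
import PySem

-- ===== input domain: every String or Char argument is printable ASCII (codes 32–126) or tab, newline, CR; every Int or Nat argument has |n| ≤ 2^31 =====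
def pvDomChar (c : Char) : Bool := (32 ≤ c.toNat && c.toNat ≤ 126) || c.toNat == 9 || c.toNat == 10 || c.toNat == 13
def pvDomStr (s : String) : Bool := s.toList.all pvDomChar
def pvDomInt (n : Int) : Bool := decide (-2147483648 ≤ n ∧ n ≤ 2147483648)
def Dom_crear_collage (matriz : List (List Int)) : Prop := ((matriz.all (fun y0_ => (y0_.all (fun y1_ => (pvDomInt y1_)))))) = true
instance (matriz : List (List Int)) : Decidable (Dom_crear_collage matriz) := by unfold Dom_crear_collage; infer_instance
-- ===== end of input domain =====

-- B computes each collage cell directly from its (i,j) position via mirror index formulas, instead of building three reflected matrices and concatenating; objective: alternative.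

-- ===== PORT A =====
def reflejar_vertical (matriz : List (List Int)) : List (List Int) :=
  (PySem.List.pyRange 0 (matriz.length : Int) 1).foldl
    (fun acc i => acc ++ [PySem.List.pyGetD matriz ((matriz.length : Int) - i - 1) []]) []

def reflejar_horizontal (matriz : List (List Int)) : List (List Int) :=
  (PySem.List.pyRange 0 (matriz.length : Int) 1).foldl
    (fun acc i => acc ++ [(PySem.List.slice? (PySem.List.pyGetD matriz i []) none none (-1)).getD []]) []

def crear_collage (matriz : List (List Int)) : List (List Int) :=
  let matriz_horizontal := reflejar_horizontal matriz
  let matriz_vertical := reflejar_vertical matriz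
  let matriz_simetrica := reflejar_vertical matriz_horizontal
  let collage := (PySem.List.pyRange 0 (matriz.length : Int) 1).foldl
    (fun acc i => acc ++ [PySem.List.pyGetD matriz i [] ++ PySem.List.pyGetD matriz_horizontal i []]) []
  (PySem.List.pyRange 0 (matriz.length : Int) 1).foldl
    (fun acc i => acc ++ [PySem.List.pyGetD matriz_vertical i [] ++ PySem.List.pyGetD matriz_simetrica i []]) collage

-- ===== PORT B =====
def crear_collage_alt (matriz : List (List Int)) : List (List Int) :=
  let F : Int := matriz.length
  (PySem.List.pyRange 0 (2 * F) 1).foldl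
    (fun acc i =>
      let src := if i < F then PySem.List.pyGetD matriz i []
                 else PySem.List.pyGetD matriz (2 * F - 1 - i) []
      let C : Int := src.length
      acc ++ [(PySem.List.pyRange 0 (2 * C) 1).map
        (fun j => PySem.List.pyGetD src (if j < C then j else 2 * C - 1 - j) 0)]) []

-- ===== PRECONDITION & SPEC =====
def Spec_crear_collage (matriz : List (List Int)) (out : List (List Int)) : Prop := out = crear_collage_alt matriz
instance (matriz : List (List Int)) (out : List (List Int)) : Decidable (Spec_crear_collage matriz out) := by unfold Spec_crear_collage; infer_instance

-- ===== CLAIM (what is proved, stated in full; the proofs are below) =====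
def Claim_equal_crear_collage : Prop := ∀ (matriz : List (List Int)), Dom_crear_collage matriz → Spec_crear_collage matriz (crear_collage matriz)

-- ===== LEMMAS AND PROOFS =====

lemma reflejar_vertical_eq (m : List (List Int)) : reflejar_vertical m = m.reverse := by
  unfold reflejar_vertical
  rw [PySem.List.foldl_append_singleton_eq_map, PySem.List.pyRange_one]
  simp only [sub_zero, Int.toNat_natCast, List.map_map, List.nil_append]
  apply List.ext_getElem
  · simp
  · intro i h1 h2
    simp only [List.getElem_map, List.getElem_range, Function.comp_apply, List.getElem_reverse]
    simp only [List.length_map, List.length_range] at h1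
    have : (m.length : Int) - (0 + (i : Int)) - 1 = ((m.length - 1 - i : Nat) : Int) := by omega
    rw [this, PySem.List.pyGetD_natCast]
    have hi : m.length - 1 - i < m.length := by omega
    simp [List.getD_eq_getElem?_getD, List.getElem?_eq_getElem hi]

lemma reflejar_horizontal_eq (m : List (List Int)) :
    reflejar_horizontal m = m.map List.reverse := by
  unfold reflejar_horizontal
  rw [show ((m.length : Int)) = (PySem.List.len m) from rfl,
      PySem.List.foldl_pyRange_zero_pyGetD m []
        (fun acc v => acc ++ [(PySem.List.slice? v none none (-1)).getD []]) []]
  rw [PySem.List.foldl_append_singleton_eq_map]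
  simp [PySem.List.slice?_none_none_neg_one]

-- both index loops of A build rows 'xs[k] + (xs.map reverse)[k]', which is xs.map (fun r => r ++ r.reverse)
lemma collage_loop_eq (xs : List (List Int)) :
    (List.range xs.length).map
      (fun (k : Nat) => PySem.List.pyGetD xs (0 + (k : Int)) [] ++
                PySem.List.pyGetD (xs.map List.reverse) (0 + (k : Int)) []) =
    xs.map (fun r => r ++ r.reverse) := by
  apply List.ext_getElem
  · simp
  · intro i h1 h2
    simp only [List.length_map, List.length_range] at h1
    simp only [List.getElem_map, List.getElem_range, zero_add]
    rw [PySem.List.pyGetD_natCast, PySem.List.pyGetD_natCast]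
    have hi : i < (xs.map List.reverse).length := by simpa using h1
    have hx : i < xs.length := h1
    simp [List.getD_eq_getElem?_getD, List.getElem?_eq_getElem hx, List.getElem?_eq_getElem hi]

-- A equals the collage in closed form: top half row r ↦ r ++ r.reverse, bottom half its vertical mirror
lemma crear_collage_closed (m : List (List Int)) :
    crear_collage m = m.map (fun r => r ++ r.reverse) ++ (m.map (fun r => r ++ r.reverse)).reverse := by
  simp only [crear_collage, reflejar_horizontal_eq, reflejar_vertical_eq,
    PySem.List.foldl_append_singleton_eq_map, PySem.List.pyRange_one,
    sub_zero, Int.toNat_natCast, List.map_map, List.nil_append, Function.comp_def]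
  have h1 := collage_loop_eq m
  have hrev : (m.map List.reverse).reverse = m.reverse.map List.reverse := by simp
  have hlen : m.length = m.reverse.length := by simp
  have h2 : (List.range m.length).map
      (fun (k : Nat) => PySem.List.pyGetD m.reverse (0 + (k : Int)) [] ++
                PySem.List.pyGetD ((m.map List.reverse).reverse) (0 + (k : Int)) []) =
      (m.map (fun r => r ++ r.reverse)).reverse := by
    rw [hrev, hlen, collage_loop_eq m.reverse, List.map_reverse]
  rw [h1, h2]

-- B's inner comprehension over mirrored column indices is r ++ r.reverse
lemma rowB_eq (r : List Int) :
    (PySem.List.pyRange 0 (2 * (r.length : Int)) 1).map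
      (fun j => PySem.List.pyGetD r (if j < (r.length : Int) then j else 2 * (r.length : Int) - 1 - j) 0) =
    r ++ r.reverse := by
  rw [PySem.List.pyRange_one]
  apply List.ext_getElem
  · simp; omega
  · intro k h1 h2
    simp only [List.map_map, List.getElem_map, Function.comp_apply]
    have hk : k < 2 * r.length := by
      simp only [List.length_map, List.length_range] at h1; omega
    rw [List.getElem_range]
    by_cases hlt : k < r.length
    · have : ((0 : Int) + (k : Int) < (r.length : Int)) := by omega
      rw [if_pos this]
      have : (0 : Int) + (k : Int) = ((k : Nat) : Int) := by omega
      rw [this, PySem.List.pyGetD_natCast]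
      simp [List.getD_eq_getElem?_getD, List.getElem?_eq_getElem hlt,
        List.getElem_append_left hlt]
    · have hge : ¬ ((0 : Int) + (k : Int) < (r.length : Int)) := by omega
      rw [if_neg hge]
      have : 2 * (r.length : Int) - 1 - (0 + (k : Int)) = ((2 * r.length - 1 - k : Nat) : Int) := by omega
      rw [this, PySem.List.pyGetD_natCast]
      have hi : 2 * r.length - 1 - k < r.length := by omega
      have hk' : k - r.length < r.reverse.length := by simp; omega
      rw [List.getElem_append_right (by omega)]
      simp only [List.getElem_reverse]
      rw [List.getD_eq_getElem?_getD, List.getElem?_eq_getElem hi]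
      simp only [Option.getD_some]
      congr 1
      omega

-- ===== VERDICT (by name: the statement is the Claim_ definition above) =====
theorem crear_collage_spec : Claim_equal_crear_collage := by
  intro m _
  show crear_collage m = crear_collage_alt m
  rw [crear_collage_closed]
  unfold crear_collage_alt
  rw [PySem.List.foldl_append_singleton_eq_map, PySem.List.pyRange_one]
  simp only [sub_zero, List.map_map, List.nil_append, Function.comp_def]
  have htn : ((2 * (m.length : Int)).toNat) = 2 * m.length := by omega
  apply List.ext_getElem
  · simp [htn]; omega
  · intro k h1 h2
    have hk : k < 2 * m.length := by simp at h1; omega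
    simp only [List.getElem_map, List.getElem_range]
    by_cases hlt : k < m.length
    · rw [if_pos (by omega : (0 : Int) + (k : Int) < (m.length : Int))]
      rw [show (0 : Int) + (k : Int) = ((k : Nat) : Int) from by omega, PySem.List.pyGetD_natCast]
      have hsrc : m.getD k [] = m[k] := by
        simp [List.getD_eq_getElem?_getD, List.getElem?_eq_getElem hlt]
      rw [hsrc, rowB_eq]
      rw [List.getElem_append_left (by simpa using hlt)]
      simp
    · rw [if_neg (by omega : ¬ ((0 : Int) + (k : Int) < (m.length : Int)))]
      rw [show 2 * (m.length : Int) - 1 - ((0 : Int) + (k : Int)) = ((2 * m.length - 1 - k : Nat) : Int) from by omega,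
        PySem.List.pyGetD_natCast]
      have hi : 2 * m.length - 1 - k < m.length := by omega
      have hsrc : m.getD (2 * m.length - 1 - k) [] = m[2 * m.length - 1 - k] := by
        simp [List.getD_eq_getElem?_getD, List.getElem?_eq_getElem hi]
      rw [hsrc, rowB_eq]
      rw [List.getElem_append_right (by simp; omega)]
      simp only [List.getElem_reverse, List.length_map, List.getElem_map]
      rw [getElem_congr_idx (show m.length - 1 - (k - m.length) = 2 * m.length - 1 - k by omega)]
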